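-- pv_equiv track=rewrite | github.com/pieterbork/ciphercrack | crack.py | get_cosets
-- ===== SOURCE A (Python) =====
-- def get_cosets(ciphertext, most_likely_length):
--     num_cosets = most_likely_length
--     total_len = len(ciphertext)
--     cosets = []
--
--     #If key length is n, there will be n cosets - one for each character.
--     for i in range(0, num_cosets):
--         coset = ""
--         #Uses key length to pick out every nth character.
--         for j in range(i, total_len, num_cosets):
--             coset += ciphertext[j]
--         cosets.append(coset)
--     return cosets
-- ===== SOURCE B (Python) =====
-- def get_cosets(ciphertext, most_likely_length):
--     num_cosets = most_likely_length
--     if num_cosets <= 0: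
--         return []
--     cosets = [""] * num_cosets
--     for idx, ch in enumerate(ciphertext):
--         cosets[idx % num_cosets] += ch
--     return cosets
-- ===== Notes on version B (the rewrite author's own statement) =====
-- stated objective: alternative
-- what changed: A makes one strided gather pass over the text per coset (n passes driven by range(i, len, n)); B makes a single linear pass over the text, distributing each character into the bucket for its position mod n.
import Mathlib
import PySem

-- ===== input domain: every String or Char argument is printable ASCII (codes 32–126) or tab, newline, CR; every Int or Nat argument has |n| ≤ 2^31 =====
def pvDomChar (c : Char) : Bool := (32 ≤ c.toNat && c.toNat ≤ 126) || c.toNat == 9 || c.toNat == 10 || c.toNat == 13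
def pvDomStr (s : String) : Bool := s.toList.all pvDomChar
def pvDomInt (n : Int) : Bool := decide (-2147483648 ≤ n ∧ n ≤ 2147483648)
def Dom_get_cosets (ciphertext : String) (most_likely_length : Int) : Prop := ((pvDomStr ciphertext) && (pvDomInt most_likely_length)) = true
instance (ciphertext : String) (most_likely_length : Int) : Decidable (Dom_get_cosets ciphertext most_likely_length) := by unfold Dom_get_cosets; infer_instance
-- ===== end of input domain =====

-- B replaces A's n strided gather passes by one linear pass distributing each character into its position-mod-n bucket (objective: alternative traversal, same cost).


-- ===== PORT A =====
-- strings are handled on the List Char side (PySem convention); every index j is in range, so pyGetD's default is never used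
def get_cosets (ciphertext : String) (most_likely_length : Int) : List String :=
  let num_cosets := most_likely_length
  let cs := ciphertext.toList
  let total_len : Int := PySem.List.len cs
  ((PySem.List.pyRange 0 num_cosets 1).foldl
    (fun cosets i =>
      cosets ++ [(PySem.List.pyRange i total_len num_cosets).foldl
        (fun coset j => coset ++ [PySem.List.pyGetD cs j ' ']) ([] : List Char)])
    []).map String.ofList

-- ===== PORT B =====
def get_cosets_alt (ciphertext : String) (most_likely_length : Int) : List String :=
  let num_cosets := most_likely_length
  if num_cosets ≤ 0 then []
  else
    ((PySem.List.enumerate ciphertext.toList 0).foldl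
      (fun cosets p =>
        PySem.List.pySetD cosets (PySem.Int.mod p.1 num_cosets)
          (PySem.List.pyGetD cosets (PySem.Int.mod p.1 num_cosets) ([] : List Char) ++ [p.2]))
      (List.replicate num_cosets.toNat ([] : List Char))).map String.ofList

-- ===== PRECONDITION & SPEC =====
def Spec_get_cosets (ciphertext : String) (most_likely_length : Int) (out : List String) : Prop := out = get_cosets_alt ciphertext most_likely_length
instance (ciphertext : String) (most_likely_length : Int) (out : List String) : Decidable (Spec_get_cosets ciphertext most_likely_length out) := by unfold Spec_get_cosets; infer_instance

-- ===== CLAIM (what is proved, stated in full; the proofs are below) =====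
def Claim_equal_get_cosets : Prop := ∀ (ciphertext : String) (most_likely_length : Int), Dom_get_cosets ciphertext most_likely_length → Spec_get_cosets ciphertext most_likely_length (get_cosets ciphertext most_likely_length)

-- ===== LEMMAS AND PROOFS =====

lemma aux_ediv_pred_of_not_dvd (d n : Int) (hn : 0 < n) (h : ¬ n ∣ d) :
    (d - 1) / n = d / n := by
  have h1 := Int.mul_ediv_add_emod d n
  have hc : n * (d / n) = (d / n) * n := mul_comm _ _
  have hr0 : 0 ≤ d % n := Int.emod_nonneg d hn.ne'
  have hrn : d % n < n := Int.emod_lt_of_pos d hn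
  have hr : d % n ≠ 0 := fun h0 => h (Int.dvd_of_emod_eq_zero h0)
  have : d - 1 = (d % n - 1) + (d / n) * n := by omega
  rw [this, Int.add_mul_ediv_right _ _ hn.ne', Int.ediv_eq_zero_of_lt (by omega) (by omega), zero_add]

lemma aux_ediv_pred_of_dvd (d n : Int) (hn : 0 < n) (h : n ∣ d) :
    (d - 1) / n = d / n - 1 := by
  have h1 := Int.mul_ediv_add_emod d n
  have hc : n * (d / n) = (d / n) * n := mul_comm _ _
  have hr : d % n = 0 := Int.emod_eq_zero_of_dvd h
  have : d - 1 = (n - 1) + (d / n - 1) * n := by ring_nf; omega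
  rw [this, Int.add_mul_ediv_right _ _ hn.ne', Int.ediv_eq_zero_of_lt (by omega) (by omega), zero_add]

lemma pyRange_step_succ_right (i b n : Int) (hn : 0 < n) (hb : 0 ≤ b) :
    PySem.List.pyRange i (b + 1) n
      = PySem.List.pyRange i b n ++ (if i ≤ b ∧ n ∣ (b - i) then [b] else []) := by
  rw [PySem.List.pyRange_of_pos _ _ hn, PySem.List.pyRange_of_pos _ _ hn]
  rcases lt_trichotomy i b with hib | hib | hib
  · -- i < b
    have hd : 0 < b - i := by omega
    have hq0 : 0 ≤ (b - i) / n := Int.ediv_nonneg (by omega) hn.le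
    have e1 : b + 1 - i + n - 1 = (b - i) + 1 * n := by ring
    have c1 : (b + 1 - i + n - 1) / n = (b - i) / n + 1 := by
      rw [e1, Int.add_mul_ediv_right _ _ hn.ne']
    by_cases hdvd : n ∣ (b - i)
    · have c0 : (b - i + n - 1) / n = (b - i) / n - 1 + 1 := by
        have e0 : b - i + n - 1 = ((b - i) - 1) + 1 * n := by ring
        rw [e0, Int.add_mul_ediv_right _ _ hn.ne', aux_ediv_pred_of_dvd _ _ hn hdvd]
      have hqpos : 0 < (b - i) / n := by
        rcases hdvd with ⟨m, hm⟩
        have : 0 < m := by nlinarith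
        rw [hm, Int.mul_ediv_cancel_left _ hn.ne']; exact this
      rw [if_pos (by omega), if_pos (by omega), if_pos (And.intro (by omega) hdvd), c1, c0]
      have : ((b - i) / n + 1).toNat = ((b - i) / n - 1 + 1).toNat + 1 := by omega
      rw [this, List.range_succ, List.map_append]
      congr 1
      simp only [List.map_cons, List.map_nil]
      congr 1
      have : (((b - i) / n - 1 + 1).toNat : Int) = (b - i) / n := by omega
      rw [this]
      have hmc := Int.ediv_mul_cancel hdvd
      have hc : n * ((b - i) / n) = ((b - i) / n) * n := mul_comm _ _
      omega
    · have c0 : (b - i + n - 1) / n = (b - i) / n + 1 := by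
        have e0 : b - i + n - 1 = ((b - i) - 1) + 1 * n := by ring
        rw [e0, Int.add_mul_ediv_right _ _ hn.ne', aux_ediv_pred_of_not_dvd _ _ hn hdvd]
      rw [if_pos (by omega), if_pos (by omega), if_neg (by tauto), c1, c0, List.append_nil]
  · -- i = b
    subst hib
    have : (i + 1 - i + n - 1) / n = 1 := by
      have : i + 1 - i + n - 1 = 0 + 1 * n := by ring
      rw [this, Int.add_mul_ediv_right _ _ hn.ne']; simp
    rw [if_pos (by omega), if_neg (by omega), this, if_pos (And.intro le_rfl (by simp))]
    simp
  · -- b < i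
    rw [if_neg (by omega), if_neg (by omega), if_neg (by omega)]
    simp

lemma cond_iff_emod (L i n : Int) (hn : 0 < n) (hL : 0 ≤ L) (hi0 : 0 ≤ i) (hin : i < n) :
    (i ≤ L ∧ n ∣ (L - i)) ↔ L % n = i := by
  constructor
  · rintro ⟨hle, m, hm⟩
    have : L = i + n * m := by omega
    rw [this, Int.add_mul_emod_self_left, Int.emod_eq_of_lt hi0 hin]
  · rintro rfl
    have h1 := Int.mul_ediv_add_emod L n
    have hc : n * (L / n) = (L / n) * n := mul_comm _ _
    have hq : 0 ≤ L / n := Int.ediv_nonneg hL hn.le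
    refine ⟨by nlinarith, ⟨L / n, by omega⟩⟩

lemma b_fold_eq (n : Int) (hn : 0 < n) (cs : List Char) :
    (PySem.List.enumerate cs 0).foldl
      (fun cosets p =>
        PySem.List.pySetD cosets (PySem.Int.mod p.1 n)
          (PySem.List.pyGetD cosets (PySem.Int.mod p.1 n) ([] : List Char) ++ [p.2]))
      (List.replicate n.toNat ([] : List Char))
    = (PySem.List.pyRange 0 n 1).map
        (fun i => (PySem.List.pyRange i (cs.length : Int) n).map
          (fun j => PySem.List.pyGetD cs j ' ')) := by
  induction cs using List.reverseRecOn with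
  | nil =>
    simp only [PySem.List.enumerate_nil, List.foldl_nil, List.length_nil, Nat.cast_zero]
    symm
    rw [List.eq_replicate_iff]
    refine ⟨by rw [List.length_map, PySem.List.length_pyRange_one]; simp, ?_⟩
    intro x hx
    rw [List.mem_map] at hx
    obtain ⟨i, hi, rfl⟩ := hx
    rw [PySem.List.mem_pyRange_one] at hi
    rw [PySem.List.pyRange_of_pos _ _ hn, if_neg (by omega)]
    simp
  | append_singleton cs c ih =>
    rw [PySem.List.enumerate_append, List.foldl_append, ih]
    set L : Int := (cs.length : Int) with hL
    have hL0 : 0 ≤ L := by positivity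
    have hmod : PySem.Int.mod L n = L % n := PySem.Int.mod_eq_emod_of_pos hn
    have hr0 : 0 ≤ L % n := Int.emod_nonneg L hn.ne'
    have hrn : L % n < n := Int.emod_lt_of_pos L hn
    simp only [PySem.List.enumerate_cons, PySem.List.enumerate_nil, List.foldl_cons, List.foldl_nil,
      zero_add, hmod]
    rw [PySem.List.pySetD_of_nonneg _ _ hr0]
    apply List.ext_getElem
    · rw [List.length_set, List.length_map, List.length_map]
    · intro k h1 h2
      rw [List.length_set, List.length_map, PySem.List.length_pyRange_one] at h1
      simp only [Int.sub_zero] at h1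
      have hkn : (k : Int) < n := by omega
      have hrk : (L % n).toNat < (PySem.List.pyRange 0 n 1).length := by
        rw [PySem.List.length_pyRange_one]; omega
      have hrget : (PySem.List.pyRange 0 n 1)[(L % n).toNat] = L % n := by
        rw [PySem.List.getElem_pyRange_one]; omega
      have hkget : (PySem.List.pyRange 0 n 1)[k]'(by rw [PySem.List.length_pyRange_one]; omega) = (k : Int) := by
        rw [PySem.List.getElem_pyRange_one]; omega
      rw [List.getElem_set, List.getElem_map, List.getElem_map, hkget]
      have hcast : ((cs ++ [c]).length : Int) = L + 1 := by simp [hL]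
      rw [hcast, pyRange_step_succ_right _ _ _ hn hL0, List.map_append]
      have hfirst : (PySem.List.pyRange (k : Int) L n).map (fun j => PySem.List.pyGetD (cs ++ [c]) j ' ')
          = (PySem.List.pyRange (k : Int) L n).map (fun j => PySem.List.pyGetD cs j ' ') := by
        apply List.map_congr_left
        intro j hj
        rw [PySem.List.mem_pyRange_iff_of_pos hn] at hj
        obtain ⟨hj1, hj2, -⟩ := hj
        have hj0 : 0 ≤ j := le_trans (Int.natCast_nonneg k) hj1
        have hjlen : j < (cs.length : Int) := by rw [← hL]; exact hj2
        rw [PySem.List.pyGetD_eq_getElem _ _ hj0 (by simp; omega),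
            PySem.List.pyGetD_eq_getElem _ _ hj0 (by exact_mod_cast hjlen)]
        exact List.getElem_append_left (by omega)
      rw [hfirst]
      by_cases hk : (L % n).toNat = k
      · rw [if_pos hk]
        have hkr : (k : Int) = L % n := by omega
        rw [if_pos (by rw [hkr]; exact (cond_iff_emod L (L % n) n hn hL0 hr0 hrn).mpr rfl)]
        simp only [List.map_cons, List.map_nil]
        congr 1
        · rw [PySem.List.pyGetD_eq_getElem _ _ hr0 (by rw [List.length_map, PySem.List.length_pyRange_one]; omega),
              List.getElem_map, hrget, hkr]
        · rw [PySem.List.pyGetD_eq_getElem _ _ hL0 (by simp [hL])]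
          simp only [hL, Int.toNat_natCast, List.getElem_concat_length]
      · rw [if_neg hk, if_neg (by
          intro hcond
          have := (cond_iff_emod L (k : Int) n hn hL0 (by omega) hkn).mp hcond
          omega)]
        simp

-- ===== VERDICT (by name: the statement is the Claim_ definition above) =====
theorem get_cosets_spec : Claim_equal_get_cosets := by
  intro ciphertext n _
  unfold Spec_get_cosets get_cosets get_cosets_alt
  by_cases hn : n ≤ 0
  · simp [hn, PySem.List.pyRange_one_eq_nil hn]
  · rw [not_le] at hn
    simp only [if_neg (not_le.mpr hn)]
    rw [b_fold_eq n hn ciphertext.toList]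
    simp only [PySem.List.foldl_append_singleton_eq_map, List.nil_append, PySem.List.len_eq]
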